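-- pv_equiv track=rewrite | github.com/chascruzrm/Prueba1 | main.py | _get_delimiter2_positions
-- ===== SOURCE A (Python) =====
-- delim2 = '}'
--
-- def _get_delimiter2_positions(q: str, pos_escape_chars: list[int]):
--
--     # Extraigo delimitadores de cierre
--     pos_delim2 = []
--     p2 = -len(delim2)
--
--     while True:
--         p2 = q.find(delim2, p2+len(delim2))
--
--         # Si se encontró un delimitador
--         if p2 >= 0:
--             # Veo si el caracter antes del delimitador no es un CE
--             if (p2 > 0 and (p2-1 not in pos_escape_chars)) or p2 == 0:
--                 pos_delim2.append(p2)
--         else: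
--             break
--
--     return pos_delim2
-- ===== SOURCE B (Python) =====
-- def _get_delimiter2_positions(q: str, pos_escape_chars: list[int]):
--     # single forward scan instead of repeated str.find jumps
--     return [i for i, c in enumerate(q)
--             if c == '}' and (i == 0 or i - 1 not in pos_escape_chars)]
-- ===== Notes on version B (the rewrite author's own statement) =====
-- stated objective: idiomatic
-- what changed: Replaces the while-True loop that repeatedly jumps between matches with str.find and a running cursor by a single enumerate comprehension over all characters, collecting each index i with q[i]=='}' and (i==0 or i-1 not in pos_escape_chars).
import Mathlib
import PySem

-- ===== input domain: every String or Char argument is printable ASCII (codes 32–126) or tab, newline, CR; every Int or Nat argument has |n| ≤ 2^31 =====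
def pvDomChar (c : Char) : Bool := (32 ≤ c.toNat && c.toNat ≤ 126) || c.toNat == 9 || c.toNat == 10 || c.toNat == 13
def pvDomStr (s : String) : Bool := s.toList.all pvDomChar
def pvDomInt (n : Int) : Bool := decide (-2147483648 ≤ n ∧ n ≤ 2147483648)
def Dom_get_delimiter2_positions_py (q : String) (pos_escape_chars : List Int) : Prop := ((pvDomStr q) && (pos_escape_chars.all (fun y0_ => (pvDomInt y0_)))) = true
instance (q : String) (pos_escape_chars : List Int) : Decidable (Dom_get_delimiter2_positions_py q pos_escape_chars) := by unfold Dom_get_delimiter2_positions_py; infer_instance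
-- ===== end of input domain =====

-- B replaces A's repeated str.find jumps by one forward scan (enumerate comprehension); same return value everywhere.

-- ===== PORT A =====
-- A's while-True loop; the fuel len(q)+1 is provably never exhausted (each found
-- position is strictly larger than the previous one), see pvALoop_eq_scan below
def pvALoop (q : List Char) (pe : List Int) : Nat → Int → List Int → List Int
  | 0, _, acc => acc
  | fuel + 1, p2, acc =>
    -- p2 = q.find(delim2, p2 + len(delim2)) with delim2 = "}"
    let p2' := PySem.Chars.findFrom q ['}'] (p2 + 1) none
    if 0 ≤ p2' then
      pvALoop q pe fuel p2'
        (if (p2' > 0 ∧ (p2' - 1) ∉ pe) ∨ p2' = 0 then acc ++ [p2'] else acc)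
    else acc

def get_delimiter2_positions_py (q : String) (pos_escape_chars : List Int) : List Int :=
  pvALoop q.toList pos_escape_chars (q.toList.length + 1) (-1) []

-- ===== PORT B =====
def get_delimiter2_positions_py_alt (q : String) (pos_escape_chars : List Int) : List Int :=
  (PySem.List.enumerate q.toList 0).filterMap
    (fun ic => if ic.2 = '}' ∧ (ic.1 = 0 ∨ (ic.1 - 1) ∉ pos_escape_chars) then some ic.1 else none)

-- ===== PRECONDITION & SPEC =====
def Spec_get_delimiter2_positions_py (q : String) (pos_escape_chars : List Int) (out : List Int) : Prop := out = get_delimiter2_positions_py_alt q pos_escape_chars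
instance (q : String) (pos_escape_chars : List Int) (out : List Int) : Decidable (Spec_get_delimiter2_positions_py q pos_escape_chars out) := by unfold Spec_get_delimiter2_positions_py; infer_instance

-- ===== CLAIM (what is proved, stated in full; the proofs are below) =====
def Claim_equal_get_delimiter2_positions_py : Prop := ∀ (q : String) (pos_escape_chars : List Int), Dom_get_delimiter2_positions_py q pos_escape_chars → Spec_get_delimiter2_positions_py q pos_escape_chars (get_delimiter2_positions_py q pos_escape_chars)

-- ===== LEMMAS AND PROOFS =====

-- proof-side reference scan, stated with A's appending condition
def pvScan (pe : List Int) : List Char → Int → List Int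
  | [], _ => []
  | c :: cs, i =>
    (if c = '}' ∧ ((i > 0 ∧ (i - 1) ∉ pe) ∨ i = 0) then [i] else []) ++ pvScan pe cs (i + 1)

theorem pvScan_append (pe : List Int) (a b : List Char) (i : Int) :
    pvScan pe (a ++ b) i = pvScan pe a i ++ pvScan pe b (i + a.length) := by
  induction a generalizing i with
  | nil => simp [pvScan]
  | cons c cs ih =>
    simp only [List.cons_append, pvScan, ih, List.length_cons, List.append_assoc,
      Nat.cast_add, Nat.cast_one]
    have h : i + ((cs.length : Int) + 1) = i + 1 + (cs.length : Int) := by ring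
    rw [h]

theorem pvScan_no_brace (pe : List Int) (l : List Char) (i : Int) (h : '}' ∉ l) :
    pvScan pe l i = [] := by
  induction l generalizing i with
  | nil => rfl
  | cons c cs ih =>
    simp only [List.mem_cons, not_or] at h
    simp [pvScan, Ne.symm h.1, ih _ h.2]

theorem pvALoop_eq_scan (q : List Char) (pe : List Int) :
    ∀ fuel (s : Nat) (acc : List Int), s ≤ q.length → q.length - s < fuel →
      pvALoop q pe fuel ((s : Int) - 1) acc = acc ++ pvScan pe (q.drop s) (s : Int) := by
  intro fuel
  induction fuel with
  | zero => intro s acc _ h; omega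
  | succ fuel ih =>
    intro s acc hs hf
    have hstep : ((s : Int) - 1) + 1 = (s : Int) := by ring
    simp only [pvALoop, hstep]
    rw [PySem.Chars.findFrom_natCast q ['}'] s hs]
    by_cases hfind : PySem.Chars.find (List.drop s q) ['}'] = -1
    · -- not found: the loop ends; the scan of the tail is empty
      have hnb : '}' ∉ List.drop s q := fun hm =>
        (PySem.Chars.find_eq_neg_one_iff (List.drop s q) ['}']).mp hfind
          ((List.singleton_infix_iff _ _).mpr hm)
      simp [hfind, pvScan_no_brace pe _ _ hnb]
    · -- found at offset f of q.drop s
      have hge : 0 ≤ PySem.Chars.find (List.drop s q) ['}'] := by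
        have := PySem.Chars.neg_one_le_find (List.drop s q) ['}']
        omega
      obtain ⟨hpre, hbefore⟩ := PySem.Chars.find_spec (s := List.drop s q) (sub := ['}']) hge
      obtain ⟨rest, hrest⟩ := hpre
      set f := (PySem.Chars.find (List.drop s q) ['}']).toNat with hfdef
      have hfint : PySem.Chars.find (List.drop s q) ['}'] = (f : Int) := by omega
      have hld : (List.drop s q).length = q.length - s := List.length_drop
      have hlenrest : rest.length + 1 = q.length - (s + f) := by
        have := congrArg List.length hrest
        simpa [List.length_drop] using this
      have hflen : f < (List.drop s q).length := by omega
      have hflenq : s + f < q.length := by omega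
      -- decompose q.drop s around the first '}' after s
      have hsplit : List.drop s q = List.take f (List.drop s q) ++ '}' :: rest := by
        conv_lhs => rw [← List.take_append_drop f (List.drop s q)]
        rw [← hrest]
        rfl
      have htnb : '}' ∉ List.take f (List.drop s q) := by
        intro hm
        obtain ⟨j, hj, hje⟩ := List.mem_take_iff_getElem.mp hm
        have hjf : j < f := lt_of_lt_of_le hj (min_le_left _ _)
        refine hbefore j hjf ?_
        have hjl : j < (List.drop s q).length := lt_of_le_of_lt hjf.le hflen
        rw [← List.getElem_cons_drop hjl, hje]
        exact ⟨_, rfl⟩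
      rw [if_neg hfind, hfint]
      have hpos : (0 : Int) ≤ (s : Int) + (f : Int) := by positivity
      rw [if_pos hpos]
      have hlen_take : (List.take f (List.drop s q)).length = f := by
        simp
        omega
      have hdropnext : rest = List.drop (s + f + 1) q := by
        have h1 : List.drop (f + 1) (List.drop s q) = rest := by
          have h2 : List.drop 1 (List.drop f (List.drop s q)) = rest := by
            rw [← hrest]
            rfl
          rwa [List.drop_drop] at h2
        rw [← h1, List.drop_drop]
        congr 1
      -- rewrite the recursive call through the induction hypothesis at s + f + 1
      have hih := ih (s + f + 1)
        (if ((s : Int) + f > 0 ∧ ((s : Int) + f - 1) ∉ pe) ∨ (s : Int) + f = 0 then acc ++ [(s : Int) + f] else acc)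
        (by omega) (by omega)
      have hcast : ((s + f + 1 : Nat) : Int) - 1 = (s : Int) + (f : Int) := by push_cast; ring
      rw [hcast] at hih
      rw [hih]
      -- and compute the scan side
      rw [hsplit, pvScan_append, pvScan_no_brace pe _ _ htnb, hlen_take]
      simp only [pvScan, List.nil_append, true_and]
      have hcast2 : ((s + f + 1 : Nat) : Int) = (s : Int) + (f : Int) + 1 := by push_cast; ring
      rw [← hdropnext, hcast2]
      by_cases hc : ((s : Int) + f > 0 ∧ ((s : Int) + f - 1) ∉ pe) ∨ (s : Int) + f = 0
      · rw [if_pos hc, if_pos hc]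
        simp
      · rw [if_neg hc, if_neg hc]
        simp

theorem pvScan_eq_alt (pe : List Int) (l : List Char) (s : Int) (hs : 0 ≤ s) :
    (PySem.List.enumerate l s).filterMap
      (fun ic => if ic.2 = '}' ∧ (ic.1 = 0 ∨ (ic.1 - 1) ∉ pe) then some ic.1 else none)
      = pvScan pe l s := by
  induction l generalizing s with
  | nil => simp [PySem.List.enumerate_nil, pvScan]
  | cons c cs ih =>
    rw [PySem.List.enumerate_cons]
    simp only [List.filterMap_cons, pvScan]
    rw [ih (s + 1) (by omega)]
    by_cases hb : c = '}'
    · by_cases h0 : s = 0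
      · simp [hb, h0]
      · by_cases hm : (s - 1) ∈ pe
        · have : ¬ (c = '}' ∧ (s = 0 ∨ (s - 1) ∉ pe)) := by tauto
          have h2 : ¬ (c = '}' ∧ ((s > 0 ∧ (s - 1) ∉ pe) ∨ s = 0)) := by
            rintro ⟨_, (⟨_, hn⟩ | hz)⟩ <;> [exact hn hm; exact h0 hz]
          rw [if_neg this, if_neg h2]
          simp
        · have h1 : c = '}' ∧ (s = 0 ∨ (s - 1) ∉ pe) := ⟨hb, Or.inr hm⟩
          have h2 : c = '}' ∧ ((s > 0 ∧ (s - 1) ∉ pe) ∨ s = 0) :=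
            ⟨hb, Or.inl ⟨by omega, hm⟩⟩
          rw [if_pos h1, if_pos h2]
          simp
    · simp [hb]

-- ===== VERDICT (by name: the statement is the Claim_ definition above) =====
theorem get_delimiter2_positions_py_spec : Claim_equal_get_delimiter2_positions_py := by
  intro q pe _
  unfold Spec_get_delimiter2_positions_py get_delimiter2_positions_py get_delimiter2_positions_py_alt
  have h := pvALoop_eq_scan q.toList pe (q.toList.length + 1) 0 [] (by omega) (by omega)
  simp only [Nat.cast_zero, zero_sub] at h
  rw [h, List.drop_zero, List.nil_append, pvScan_eq_alt pe q.toList 0 le_rfl]
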